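-- pv_equiv track=rewrite | github.com/anusha-potnuru/PreSumm | src/test.py | total_selection
-- ===== SOURCE A (Python) =====
-- def total_selection(src, tgt): #return all sent ids of src that are tgt
--     sent_labels = []
--     i=0
--     for sent in tgt:
--         while i<len(src) and sent!=src[i]:
--             i+=1
--         if i==len(src):
--             break
--         sent_labels.append(i)
--     return sent_labels
-- ===== SOURCE B (Python) =====
-- def total_selection(src, tgt):  # return all sent ids of src that are tgt
--     labels = []
--     rest = tgt  # remaining target sentences, consumed front-to-back
--     for i, elem in enumerate(src):
--         if not rest:
--             break
--         while rest and rest[0] == elem: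
--             labels.append(i)
--             rest = rest[1:]
--     return labels
-- ===== Notes on version B (the rewrite author's own statement) =====
-- stated objective: alternative
-- what changed: B drives the loop over src with a remaining-tgt suffix (inner while consumes a run of equal targets per src position, breaking once tgt is exhausted), instead of A's loop over tgt with a persistent src index scanned forward per target.
import Mathlib
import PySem

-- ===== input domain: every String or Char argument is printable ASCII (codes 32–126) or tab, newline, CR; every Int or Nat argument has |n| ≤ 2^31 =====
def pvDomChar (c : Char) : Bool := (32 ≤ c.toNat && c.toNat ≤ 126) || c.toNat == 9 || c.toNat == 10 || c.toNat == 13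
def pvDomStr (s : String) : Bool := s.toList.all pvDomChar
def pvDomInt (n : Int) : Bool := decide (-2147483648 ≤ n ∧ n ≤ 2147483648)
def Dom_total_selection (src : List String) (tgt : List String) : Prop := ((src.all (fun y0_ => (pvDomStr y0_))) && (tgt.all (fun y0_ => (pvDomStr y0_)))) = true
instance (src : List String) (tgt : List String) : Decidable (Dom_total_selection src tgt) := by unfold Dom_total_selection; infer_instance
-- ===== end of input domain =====

-- B drives the loop over src with a remaining-tgt suffix instead of A's loop over tgt with a persistent src index; same result.


-- ===== PORT A =====
-- the inner 'while i<len(src) and sent!=src[i]: i+=1'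
def tsAdv (src : List String) (sent : String) (i : Nat) : Nat :=
  if h : i < src.length then
    if sent ≠ src[i] then tsAdv src sent (i + 1) else i
  else i
termination_by src.length - i

-- the outer 'for sent in tgt' loop with persistent index i (break when i==len(src))
def tsLoopA (src : List String) (tgt : List String) (i : Nat) : List Int :=
  match tgt with
  | [] => []
  | sent :: ts =>
    let i' := tsAdv src sent i
    if i' = src.length then [] else (i' : Int) :: tsLoopA src ts i'

def total_selection (src : List String) (tgt : List String) : List Int :=
  tsLoopA src tgt 0

-- ===== PORT B =====
-- the inner 'while rest and rest[0] == elem: labels.append(i); rest = rest[1:]'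
def tsMatch (elem : String) (i : Nat) (rest : List String) : List Int × List String :=
  match rest with
  | [] => ([], [])
  | t :: ts =>
    if t = elem then
      let p := tsMatch elem i ts
      ((i : Int) :: p.1, p.2)
    else ([], t :: ts)

-- the 'for i, elem in enumerate(src)' loop (break when rest is empty)
def tsLoopB (src : List String) (i : Nat) (rest : List String) : List Int :=
  match src with
  | [] => []
  | elem :: srest =>
    match rest with
    | [] => []
    | _ :: _ =>
      let p := tsMatch elem i rest
      p.1 ++ tsLoopB srest (i + 1) p.2

def total_selection_alt (src : List String) (tgt : List String) : List Int :=
  tsLoopB src 0 tgt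

-- ===== PRECONDITION & SPEC =====
def Spec_total_selection (src : List String) (tgt : List String) (out : List Int) : Prop := out = total_selection_alt src tgt
instance (src : List String) (tgt : List String) (out : List Int) : Decidable (Spec_total_selection src tgt out) := by unfold Spec_total_selection; infer_instance

-- ===== CLAIM (what is proved, stated in full; the proofs are below) =====
def Claim_equal_total_selection : Prop := ∀ (src : List String) (tgt : List String), Dom_total_selection src tgt → Spec_total_selection src tgt (total_selection src tgt)

-- ===== LEMMAS AND PROOFS =====
theorem tsLoopB_nil (src : List String) (i : Nat) : tsLoopB src i [] = [] := by
  cases src <;> rfl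

theorem tsAdv_ge (src : List String) (sent : String) (i : Nat) (h : src.length ≤ i) :
    tsAdv src sent i = i := by
  unfold tsAdv
  simp [Nat.not_lt.mpr h]

theorem tsAdv_eq (src : List String) (sent : String) (i : Nat) (h : i < src.length)
    (he : sent = src[i]) : tsAdv src sent i = i := by
  unfold tsAdv
  simp [h, he]

theorem tsAdv_ne (src : List String) (sent : String) (i : Nat) (h : i < src.length)
    (hne : sent ≠ src[i]) : tsAdv src sent i = tsAdv src sent (i + 1) := by
  rw [tsAdv]
  simp [h, hne]

-- the key bridge: A's loop from index i equals B's loop over the suffix src.drop i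
theorem ts_main (src : List String) : ∀ n tgt i, tgt.length + (src.length - i) ≤ n → i ≤ src.length →
    tsLoopA src tgt i = tsLoopB (src.drop i) i tgt := by
  intro n
  induction n with
  | zero =>
    intro tgt i hle _
    have : tgt = [] := by
      cases tgt with
      | nil => rfl
      | cons a b => simp at hle
    subst this
    simp [tsLoopA, tsLoopB_nil]
  | succ n ih =>
    intro tgt i hle hile
    cases tgt with
    | nil => simp [tsLoopA, tsLoopB_nil]
    | cons sent ts =>
      by_cases hi : i < src.length
      · have hdrop : src.drop i = src[i] :: src.drop (i + 1) :=
          List.drop_eq_getElem_cons hi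
        by_cases he : sent = src[i]
        · -- match at i: A records i and stays; B's inner while consumes sent
          have hadv : tsAdv src sent i = i := tsAdv_eq src sent i hi he
          have hA : tsLoopA src (sent :: ts) i = (i : Int) :: tsLoopA src ts i := by
            rw [tsLoopA]
            simp only [hadv]
            rw [if_neg (Nat.ne_of_lt hi)]
          have hIH : tsLoopA src ts i = tsLoopB (src.drop i) i ts := by
            apply ih _ _ (by simp at hle ⊢; omega) hile
          have hB : tsLoopB (src.drop i) i (sent :: ts) =
              (i : Int) :: (tsMatch src[i] i ts).1 ++ tsLoopB (src.drop (i + 1)) (i + 1) (tsMatch src[i] i ts).2 := by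
            rw [hdrop, tsLoopB]
            simp [tsMatch, he]
          have hts : tsLoopB (src.drop i) i ts =
              (tsMatch src[i] i ts).1 ++ tsLoopB (src.drop (i + 1)) (i + 1) (tsMatch src[i] i ts).2 := by
            rw [hdrop]
            cases ts with
            | nil => simp [tsLoopB_nil, tsMatch]
            | cons t ts' => rw [tsLoopB]
          rw [hA, hB, hIH, hts]
          simp
        · -- no match at i: A advances i; B moves to the next src element with rest unchanged
          have hA : tsLoopA src (sent :: ts) i = tsLoopA src (sent :: ts) (i + 1) := by
            rw [tsLoopA, tsLoopA, tsAdv_ne src sent i hi he]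
          have hB : tsLoopB (src.drop i) i (sent :: ts) =
              tsLoopB (src.drop (i + 1)) (i + 1) (sent :: ts) := by
            rw [hdrop, tsLoopB]
            simp [tsMatch, he]
          rw [hA, hB]
          apply ih _ _ (by simp at hle ⊢; omega) hi
      · -- i == len(src): A's scan stops at len and breaks; B's src suffix is empty
        have hge : src.length ≤ i := Nat.not_lt.mp hi
        have hA : tsLoopA src (sent :: ts) i = [] := by
          rw [tsLoopA]
          have hieq : i = src.length := le_antisymm hile hge
          subst hieq
          simp [tsAdv_ge src sent src.length (le_refl _)]
        have hB : src.drop i = [] := List.drop_eq_nil_of_le hge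
        rw [hA, hB, tsLoopB]

-- ===== VERDICT (by name: the statement is the Claim_ definition above) =====
theorem total_selection_spec : Claim_equal_total_selection := by
  intro src tgt _
  unfold Spec_total_selection total_selection total_selection_alt
  have := ts_main src (tgt.length + src.length) tgt 0 (by omega) (by omega)
  simpa using this
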